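-- pv_equiv track=rewrite | github.com/Dikshuy/programming-hints | problems_data_structures/week3_hash_tables/3_hash_substring/hash_substring.py | pre_computed_hash
-- ===== SOURCE A (Python) =====
-- def poly_hash(s, x, p):
--     ans = 0
--     for c in reversed(s):
--         ans = (ans * x + ord(c)) % p
--     return ans
--
-- def pre_computed_hash(T, P, x, p):
--     lT = len(T)
--     lP = len(P)
--     H = [[] for _ in range(lT-lP+1)]
--     S = T[lT-lP:]
--     H[lT-lP] = poly_hash(S, x, p)
--     y = 1
--     for _ in range(1, lP+1):
--         y = (y*x)%p
--     for i in range(lT-lP-1, -1, -1):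
--         H[i] = (x*H[i+1] + ord(T[i]) - y*ord(T[i+lP]))%p
--
--     return H
-- ===== SOURCE B (Python) =====
-- def poly_hash(s, x, p):
--     ans = 0
--     for c in reversed(s):
--         ans = (ans * x + ord(c)) % p
--     return ans
--
-- def pre_computed_hash(T, P, x, p):
--     lP = len(P)
--     return [poly_hash(T[i:i+lP], x, p) for i in range(len(T) - lP + 1)]
-- ===== Notes on version B (the rewrite author's own statement) =====
-- stated objective: simpler
-- what changed: B drops the rolling-hash recurrence (and the x^|P| power loop) and computes each window's hash independently with poly_hash over the slice T[i:i+len(P)], a one-line comprehension instead of placeholder allocation plus a backwards recurrence.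
import Mathlib
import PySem

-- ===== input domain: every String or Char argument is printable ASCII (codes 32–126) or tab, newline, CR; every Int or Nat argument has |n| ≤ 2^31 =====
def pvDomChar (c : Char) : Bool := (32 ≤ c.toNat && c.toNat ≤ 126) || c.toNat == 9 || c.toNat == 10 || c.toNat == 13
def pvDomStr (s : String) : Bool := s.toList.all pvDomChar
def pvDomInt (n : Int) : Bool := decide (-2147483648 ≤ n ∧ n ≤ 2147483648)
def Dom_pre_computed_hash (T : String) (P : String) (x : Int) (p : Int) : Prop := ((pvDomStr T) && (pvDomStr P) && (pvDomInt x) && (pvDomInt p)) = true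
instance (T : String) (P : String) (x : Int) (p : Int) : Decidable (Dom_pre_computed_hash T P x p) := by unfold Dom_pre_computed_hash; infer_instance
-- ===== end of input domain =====

-- B replaces A's backwards rolling-hash recurrence by an independent poly_hash of each
-- window T[i:i+len(P)] — simpler (one comprehension, no placeholder list, no power loop).

-- ===== PORT A =====
-- shared helper: the module's poly_hash (used by A for the last window, by B for every window)
def polyHash (s : List Char) (x p : Int) : Int :=
  s.reverse.foldl (fun ans c => PySem.Int.mod (ans * x + (c.toNat : Int)) p) 0

-- body of A's backwards loop: H[i] = (x*H[i+1] + ord(T[i]) - y*ord(T[i+lP])) % p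
-- (indices are in range under Pre_, so pyGetD defaults / List.set are exact)
def rollStep (t : List Char) (lP x p y : Int) (H : List Int) (i : Int) : List Int :=
  H.set i.toNat (PySem.Int.mod
    (x * PySem.List.pyGetD H (i + 1) 0 + ((PySem.List.pyGetD t i 'a').toNat : Int)
      - y * ((PySem.List.pyGetD t (i + lP) 'a').toNat : Int)) p)

def pre_computed_hash (T : String) (P : String) (x : Int) (p : Int) : List Int :=
  let t := T.toList
  let lT : Int := (t.length : Int)
  let lP : Int := (P.toList.length : Int)
  -- H = [[] for _ in range(lT-lP+1)]: the [] placeholders (all overwritten under Pre_) are 0 here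
  let H0 : List Int := (PySem.List.pyRange 0 (lT - lP + 1) 1).map (fun _ => 0)
  let S := PySem.List.slice t (some (lT - lP)) none
  let H1 := H0.set (lT - lP).toNat (polyHash S x p)
  let y := (PySem.List.pyRange 1 (lP + 1) 1).foldl (fun y _ => PySem.Int.mod (y * x) p) 1
  (PySem.List.pyRange (lT - lP - 1) (-1) (-1)).foldl (rollStep t lP x p y) H1

-- ===== PORT B =====
def pre_computed_hash_alt (T : String) (P : String) (x : Int) (p : Int) : List Int :=
  let t := T.toList
  let lP : Int := (P.toList.length : Int)
  (PySem.List.pyRange 0 ((t.length : Int) - lP + 1) 1).map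
    (fun i => polyHash (PySem.List.slice t (some i) (some (i + lP))) x p)

-- ===== PRECONDITION & SPEC =====
-- Pre_ is exactly A's return domain: A raises IndexError when len(P) > len(T), and
-- ZeroDivisionError when p = 0 with T nonempty; it returns on everything else.
def Pre_pre_computed_hash (T : String) (P : String) (x : Int) (p : Int) : Prop :=
  P.toList.length ≤ T.toList.length ∧ (p ≠ 0 ∨ T.toList.length = 0)
instance (T : String) (P : String) (x : Int) (p : Int) : Decidable (Pre_pre_computed_hash T P x p) := by unfold Pre_pre_computed_hash; infer_instance
def pvWitness_pre_computed_hash : String × String × Int × Int := ("ab", "b", 31, 97)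

def Spec_pre_computed_hash (T : String) (P : String) (x : Int) (p : Int) (out : List Int) : Prop := out = pre_computed_hash_alt T P x p
instance (T : String) (P : String) (x : Int) (p : Int) (out : List Int) : Decidable (Spec_pre_computed_hash T P x p out) := by unfold Spec_pre_computed_hash; infer_instance

-- ===== CLAIM (what is proved, stated in full; the proofs are below) =====
def Claim_equal_pre_computed_hash : Prop := ∀ (T : String) (P : String) (x : Int) (p : Int), Dom_pre_computed_hash T P x p → Pre_pre_computed_hash T P x p → Spec_pre_computed_hash T P x p (pre_computed_hash T P x p)
-- ===== LEMMAS AND PROOFS =====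

-- value of poly_hash before the final mod: pvPoly x [c0,…,ck] = Σ x^j·ord(cj)
def pvPoly (x : Int) : List Char → Int
  | [] => 0
  | ch :: s => (ch.toNat : Int) + x * pvPoly x s

-- ord of t[j] as the ports read it
def pvOrd (t : List Char) (j : Nat) : Int := ((t.getD j 'a').toNat : Int)

-- hash of the window starting at i
def pvH (t : List Char) (m : Nat) (x p : Int) (i : Nat) : Int :=
  (pvPoly x ((t.drop i).take m)).fmod p

lemma polyHash_eq (s : List Char) (x p : Int) :
    polyHash s x p = (pvPoly x s).fmod p := by
  induction s with
  | nil => simp [polyHash, pvPoly, Int.zero_fmod]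
  | cons ch s ih =>
    simp only [polyHash, List.reverse_cons, List.foldl_append, List.foldl_cons, List.foldl_nil] at *
    rw [ih]
    show ((pvPoly x s).fmod p * x + (ch.toNat : Int)).fmod p = (pvPoly x (ch :: s)).fmod p
    have : pvPoly x (ch :: s) = pvPoly x s * x + (ch.toNat : Int) := by
      simp [pvPoly]; ring
    rw [this, Int.add_fmod, Int.mul_fmod, Int.fmod_fmod, ← Int.mul_fmod, ← Int.add_fmod]

lemma pvPoly_append (s : List Char) (b : Char) (x : Int) :
    pvPoly x (s ++ [b]) = pvPoly x s + x ^ s.length * (b.toNat : Int) := by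
  induction s with
  | nil => simp [pvPoly]
  | cons ch s ih => simp [pvPoly, ih]; ring

lemma pv_step (t : List Char) (x : Int) (i m : Nat) (h : i + 1 + m ≤ t.length) :
    x * pvPoly x ((t.drop (i+1)).take m) + pvOrd t i - x ^ m * pvOrd t (i+m)
      = pvPoly x ((t.drop i).take m) := by
  cases m with
  | zero => simp [pvPoly, pvOrd]
  | succ k =>
    have hi : i < t.length := by omega
    have hik : i + 1 + k < t.length := by omega
    have h1 : (t.drop i).take (k+1) = t[i] :: (t.drop (i+1)).take k := by
      rw [List.drop_eq_getElem_cons hi, List.take_succ_cons]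
    have h2 : (t.drop (i+1)).take (k+1) = (t.drop (i+1)).take k ++ [t[i+1+k]] := by
      rw [List.take_add_one]
      congr 1
      rw [List.getElem?_drop, List.getElem?_eq_getElem hik]
      rfl
    rw [h1, h2, pvPoly_append]
    have hlen : ((t.drop (i+1)).take k).length = k := by
      rw [List.length_take, List.length_drop]; omega
    have ho1 : pvOrd t i = (t[i].toNat : Int) := by
      simp [pvOrd, List.getElem?_eq_getElem hi]
    have ho2 : pvOrd t (i + (k+1)) = (t[i+1+k].toNat : Int) := by
      have : i + (k+1) = i + 1 + k := by omega
      rw [this]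
      simp [pvOrd, List.getElem?_eq_getElem hik]
    rw [hlen, ho1, ho2]
    simp [pvPoly]
    ring

lemma y_congr (x p : Int) (l : List Int) (a : Int) :
    (l.foldl (fun y _ => (y * x).fmod p) a).fmod p = (a * x ^ l.length).fmod p := by
  induction l generalizing a with
  | nil => simp
  | cons b l ih =>
    rw [List.foldl_cons, ih]
    rw [List.length_cons, Int.mul_fmod, Int.fmod_fmod, ← Int.mul_fmod]
    congr 1
    ring

lemma set_replicate_last (N : Nat) (v : Int) :
    (List.replicate (N+1) (0:Int)).set N v = List.replicate N 0 ++ [v] := by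
  induction N with
  | zero => rfl
  | succ k ih =>
    rw [List.replicate_succ, List.set_cons_succ, ih, List.replicate_succ, List.cons_append]

-- congruence for the recurrence body
lemma fmod_lin (p x c d A y e : Int) (hy : y.fmod p = e.fmod p) :
    (x * A.fmod p + c - y * d).fmod p = (x * A + c - e * d).fmod p := by
  rw [Int.sub_fmod, Int.add_fmod, Int.mul_fmod x (A.fmod p), Int.fmod_fmod,
      ← Int.mul_fmod, ← Int.add_fmod, Int.mul_fmod y d, hy, ← Int.mul_fmod, ← Int.sub_fmod]

-- invariant of A's backwards loop
lemma roll_inv (t : List Char) (m : Nat) (x p y : Int)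
    (hm : m ≤ t.length)
    (hy : y.fmod p = (x ^ m).fmod p) :
    ∀ (i : Nat), i ≤ t.length - m →
    (PySem.List.pyRange ((i:Int) - 1) (-1) (-1)).foldl (rollStep t (m:Int) x p y)
      (List.replicate i 0 ++ (List.range' i (t.length - m + 1 - i)).map (pvH t m x p))
    = (List.range' 0 (t.length - m + 1)).map (pvH t m x p) := by
  intro i
  induction i with
  | zero =>
    intro _
    rw [PySem.List.pyRange_neg_one_eq_nil (by norm_num)]
    simp
  | succ j ih =>
    intro hj
    have hcast : ((j:Int) + 1) - 1 = (j:Int) := by ring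
    have hcons : PySem.List.pyRange (((j+1:Nat):Int) - 1) (-1) (-1)
        = (j:Int) :: PySem.List.pyRange ((j:Int) - 1) (-1) (-1) := by
      push_cast
      rw [hcast, PySem.List.pyRange_neg_one_cons (by omega)]
    rw [hcons, List.foldl_cons]
    have hstep : rollStep t (m:Int) x p y
        (List.replicate (j+1) 0 ++ (List.range' (j+1) (t.length - m + 1 - (j+1))).map (pvH t m x p)) (j:Int)
        = List.replicate j 0 ++ (List.range' j (t.length - m + 1 - j)).map (pvH t m x p) := by
      have hk : ∃ k, t.length - m + 1 - (j+1) = k + 1 := ⟨t.length - m - 1 - j, by omega⟩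
      obtain ⟨k, hkk⟩ := hk
      unfold rollStep
      -- the H[i+1] read
      have hget : PySem.List.pyGetD
          (List.replicate (j+1) (0:Int) ++ (List.range' (j+1) (t.length - m + 1 - (j+1))).map (pvH t m x p))
          ((j:Int) + 1) 0 = pvH t m x p (j+1) := by
        have : ((j:Int) + 1) = ((j+1:Nat):Int) := by push_cast; ring
        rw [this, PySem.List.pyGetD_natCast]
        rw [List.getD_append_right _ _ _ _ (by simp)]
        simp only [List.length_replicate, Nat.sub_self, hkk, List.range'_succ, List.map_cons,
          List.getD_cons_zero]
      rw [hget]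
      -- the ords
      have hoi : ((PySem.List.pyGetD t (j:Int) 'a').toNat : Int) = pvOrd t j := by
        rw [PySem.List.pyGetD_natCast]; rfl
      have hoim : ((PySem.List.pyGetD t ((j:Int) + (m:Int)) 'a').toNat : Int) = pvOrd t (j+m) := by
        have : (j:Int) + (m:Int) = ((j+m:Nat):Int) := by push_cast; ring
        rw [this, PySem.List.pyGetD_natCast]; rfl
      rw [hoi, hoim]
      -- the new value is pvH j
      have hval : (x * pvH t m x p (j+1) + pvOrd t j - y * pvOrd t (j+m)).fmod p
          = pvH t m x p j := by
        unfold pvH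
        rw [fmod_lin p x (pvOrd t j) (pvOrd t (j+m)) (pvPoly x ((t.drop (j+1)).take m)) y (x ^ m) hy,
            pv_step t x j m (by omega)]
      -- perform the set
      have hset : (List.replicate (j+1) (0:Int) ++ (List.range' (j+1) (t.length - m + 1 - (j+1))).map (pvH t m x p)).set
          ((j:Int)).toNat (pvH t m x p j)
          = List.replicate j 0 ++ (List.range' j (t.length - m + 1 - j)).map (pvH t m x p) := by
        rw [Int.toNat_natCast]
        rw [List.set_append_left _ _ (by simp)]
        rw [set_replicate_last]
        have : t.length - m + 1 - j = (t.length - m + 1 - (j+1)) + 1 := by omega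
        rw [this, List.range'_succ, List.map_cons, List.append_assoc, List.singleton_append]
      rw [show PySem.Int.mod = Int.fmod from rfl, hval, hset]
    rw [hstep]
    exact ih (by omega)

-- the two ports, fully unfolded, agree for every t and m ≤ |t| (p arbitrary: fmod is total)
lemma main_eq (t : List Char) (m : Nat) (x p : Int) (hm : m ≤ t.length) :
    (PySem.List.pyRange ((t.length : Int) - (m:Int) - 1) (-1) (-1)).foldl
      (rollStep t (m:Int) x p
        ((PySem.List.pyRange 1 ((m:Int) + 1) 1).foldl (fun y _ => PySem.Int.mod (y * x) p) 1))
      (((PySem.List.pyRange 0 ((t.length : Int) - (m:Int) + 1) 1).map (fun _ => (0:Int))).set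
        ((t.length : Int) - (m:Int)).toNat
        (polyHash (PySem.List.slice t (some ((t.length : Int) - (m:Int))) none) x p))
    = (PySem.List.pyRange 0 ((t.length : Int) - (m:Int) + 1) 1).map
        (fun i => polyHash (PySem.List.slice t (some i) (some (i + (m:Int)))) x p) := by
  simp only [show PySem.Int.mod = Int.fmod from rfl]
  have hc : (t.length : Int) - (m : Int) = ((t.length - m : Nat) : Int) := by omega
  rw [hc]
  have hc2 : ((t.length - m : Nat) : Int) + 1 = ((t.length - m + 1 : Nat) : Int) := by
    push_cast
    ring
  rw [hc2, PySem.List.pyRange_zero_nat, List.map_map, List.map_map]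
  simp only [Function.comp_def]
  rw [List.map_const', List.length_range, Int.toNat_natCast, PySem.List.slice_from_natCast,
      set_replicate_last]
  have hv : polyHash (t.drop (t.length - m)) x p = pvH t m x p (t.length - m) := by
    unfold pvH
    rw [List.take_of_length_le (by rw [List.length_drop]; omega)]
    exact polyHash_eq _ _ _
  rw [hv]
  have hsingle : List.replicate (t.length - m) (0:Int) ++ [pvH t m x p (t.length - m)]
      = List.replicate (t.length - m) 0 ++
        (List.range' (t.length - m) (t.length - m + 1 - (t.length - m))).map (pvH t m x p) := by
    have h1 : t.length - m + 1 - (t.length - m) = 1 := by omega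
    rw [h1, List.range'_one, List.map_singleton]
  rw [hsingle]
  rw [roll_inv t m x p _ hm
      (by rw [y_congr]; norm_num [PySem.List.length_pyRange_one]) (t.length - m) le_rfl]
  rw [List.range_eq_range']
  symm
  apply List.map_congr_left
  intro k _
  rw [PySem.List.slice_natCast_add, polyHash_eq]
  rfl

-- ===== VERDICT (by name: the statement is the Claim_ definition above) =====
theorem pre_computed_hash_spec : Claim_equal_pre_computed_hash := by
  intro T P x p _ hpre
  unfold Spec_pre_computed_hash pre_computed_hash pre_computed_hash_alt
  exact main_eq T.toList P.toList.length x p hpre.1
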